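-- pv_equiv track=rewrite | github.com/Zaroganos/goldflipper | goldflipper/tools/play-csv-ingestion-tool.py | build_composite_headers
-- ===== SOURCE A (Python) =====
-- def build_composite_headers(header_rows):
--     """
--     Merge header rows by concatenating nonempty cell values (from top to bottom)
--     for each column. This ensures that if the bottom row is blank but an upper row contains
--     an important term like "Strike Price", it will be included in the merged header.
--     """
--     if not header_rows:
--         return []
--     num_cols = max(len(row) for row in header_rows)
--     composite = []
--     for j in range(num_cols):
--         col_parts = []
--         for row in header_rows:
--             if j < len(row):
--                 cell = row[j].strip()
--                 if cell:
--                     col_parts.append(cell)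
--         composite.append(" ".join(col_parts))
--     return composite
-- ===== SOURCE B (Python) =====
-- def build_composite_headers(header_rows):
--     """Single row-major pass: fold every row into a growing accumulator of
--     per-column parts lists (appending a new empty column the first time an
--     index is reached), then join each column's parts at the end.
--     No column count is ever computed and rows are scanned exactly once."""
--     cols = []
--     for row in header_rows:
--         for j, cell in enumerate(row):
--             if j == len(cols):
--                 cols.append([])
--             c = cell.strip()
--             if c:
--                 cols[j].append(c)
--     return [" ".join(parts) for parts in cols]
-- ===== Notes on version B (the rewrite author's own statement) =====
-- stated objective: alternative
-- what changed: Replaces A's column-major nested loops (compute max column count, then for each column index rescan every row with bounds checks) by a single row-major pass that folds each row cell-by-cell into a growing accumulator of per-column parts lists, joining the columns only at the end; no column count or per-column rescans exist.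
import Mathlib
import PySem

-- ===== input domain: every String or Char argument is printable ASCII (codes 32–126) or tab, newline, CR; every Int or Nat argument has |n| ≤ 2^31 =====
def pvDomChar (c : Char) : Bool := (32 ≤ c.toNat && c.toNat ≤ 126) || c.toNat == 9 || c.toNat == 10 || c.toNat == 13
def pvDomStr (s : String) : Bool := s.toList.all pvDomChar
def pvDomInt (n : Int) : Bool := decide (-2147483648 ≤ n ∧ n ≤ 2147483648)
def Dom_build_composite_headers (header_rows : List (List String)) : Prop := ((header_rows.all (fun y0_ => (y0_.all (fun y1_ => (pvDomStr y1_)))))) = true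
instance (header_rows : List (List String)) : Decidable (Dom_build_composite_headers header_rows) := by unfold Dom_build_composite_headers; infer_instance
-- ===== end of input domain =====

-- B replaces A's column-major nested loops by a single row-major pass folding each
-- row into a growing per-column parts accumulator (alternative; same cost).

-- ===== PORT A =====
def build_composite_headers (header_rows : List (List String)) : List String :=
  if header_rows = [] then []
  else
    let num_cols : Int :=
      (PySem.List.max? (header_rows.map (fun row => PySem.List.len row)) (fun x => x)).getD 0
    (PySem.List.pyRange 0 num_cols 1).foldl (fun composite j =>
      let col_parts := header_rows.foldl (fun col_parts row =>
        if j < PySem.List.len row then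
          let cell := PySem.Str.strip (PySem.List.pyGetD row j "")
          if cell ≠ "" then col_parts ++ [cell] else col_parts
        else col_parts) ([] : List String)
      composite ++ [PySem.Str.join " " col_parts]) []

-- ===== PORT B =====
-- one enumerated cell (j, cell): append a fresh empty column when j first reached,
-- then append the stripped nonempty cell to column j's parts
def pvStep (cols : List (List String)) (p : Int × String) : List (List String) :=
  let cols2 := if p.1 = PySem.List.len cols then cols ++ [([] : List String)] else cols
  let c := PySem.Str.strip p.2
  if c ≠ "" then cols2.set p.1.toNat ((cols2.getD p.1.toNat []) ++ [c]) else cols2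

def build_composite_headers_alt (header_rows : List (List String)) : List String :=
  (header_rows.foldl (fun cols row => (PySem.List.enumerate row 0).foldl pvStep cols) []).map
    (fun parts => PySem.Str.join " " parts)

-- ===== PRECONDITION & SPEC =====
def Spec_build_composite_headers (header_rows : List (List String)) (out : List String) : Prop := out = build_composite_headers_alt header_rows
instance (header_rows : List (List String)) (out : List String) : Decidable (Spec_build_composite_headers header_rows out) := by unfold Spec_build_composite_headers; infer_instance

-- ===== CLAIM (what is proved, stated in full; the proofs are below) =====
def Claim_equal_build_composite_headers : Prop := ∀ (header_rows : List (List String)), Dom_build_composite_headers header_rows → Spec_build_composite_headers header_rows (build_composite_headers header_rows)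

-- ===== LEMMAS AND PROOFS =====

-- max column count, as a Nat
def pvM (rows : List (List String)) : Nat := (rows.map List.length).foldl max 0

-- the part row contributes to column k
def pvPart (row : List String) (k : Nat) : List String :=
  if PySem.Str.strip (row.getD k "") = "" then [] else [PySem.Str.strip (row.getD k "")]

-- the parts of column k, shared normal form of both sides
def pvCol (k : Nat) (rows : List (List String)) : List String :=
  (rows.map (fun r => PySem.Str.strip (r.getD k ""))).filter (fun c => c ≠ "")

theorem strip_empty : PySem.Str.strip "" = "" := by decide

theorem pvPart_nil (k : Nat) : pvPart [] k = [] := by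
  have h : (([] : List String).getD k "") = "" := by cases k <;> rfl
  rw [pvPart, h, strip_empty, if_pos rfl]

theorem pvCol_cons (k : Nat) (r : List String) (rs : List (List String)) :
    pvCol k (r :: rs) = pvPart r k ++ pvCol k rs := by
  simp only [pvCol, pvPart, List.map_cons, List.filter_cons]
  split_ifs with hc <;> simp_all

-- ----- B-side characterisation -----

theorem getD_pad (cols : List (List String)) (k : Nat) :
    (cols ++ [([] : List String)]).getD k [] = cols.getD k [] := by
  simp only [List.getD_eq_getElem?_getD, List.getElem?_append]
  split_ifs with h
  · rfl
  · rcases Nat.lt_or_ge k (cols.length + 1) with h1 | h1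
    · have hk : k - cols.length = 0 := by omega
      have h2 : k ≥ cols.length := by omega
      rw [List.getElem?_eq_none (l := cols) (by omega), hk]
      rfl
    · rw [List.getElem?_eq_none (l := cols) (by omega),
        List.getElem?_eq_none (l := [([] : List String)]) (by simp; omega)]

theorem getD_set (l : List (List String)) (i k : Nat) (x : List String) :
    (l.set i x).getD k [] = if k = i ∧ i < l.length then x else l.getD k [] := by
  simp only [List.getD_eq_getElem?_getD, List.getElem?_set]
  by_cases h1 : i = k
  · subst h1
    by_cases h2 : i < l.length
    · rw [if_pos rfl, if_pos h2, if_pos ⟨rfl, h2⟩]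
      rfl
    · rw [if_pos rfl, if_neg h2, if_neg (fun h' => h2 h'.2),
        List.getElem?_eq_none (l := l) (by omega)]
  · rw [if_neg h1, if_neg (fun h' => h1 h'.1.symm)]

theorem step_len (cols : List (List String)) (i : Nat) (cell : String) (hi : i ≤ cols.length) :
    (pvStep cols ((i : Nat), cell)).length = max cols.length (i + 1) := by
  unfold pvStep
  simp only [PySem.List.len_eq]
  by_cases h : (i : Int) = (cols.length : Int)
  · rw [if_pos h]
    have : i = cols.length := by omega
    split_ifs <;>
      simp only [List.length_set, List.length_append, List.length_cons, List.length_nil] <;>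
      omega
  · rw [if_neg h]
    have : i < cols.length := by omega
    split_ifs <;> first | (simp only [List.length_set]; omega) | omega

theorem step_getD (cols : List (List String)) (i : Nat) (cell : String) (hi : i ≤ cols.length)
    (k : Nat) :
    (pvStep cols ((i : Nat), cell)).getD k []
      = cols.getD k [] ++ (if k = i then pvPart [cell] 0 else []) := by
  have hpart : pvPart [cell] 0
      = if PySem.Str.strip cell = "" then [] else [PySem.Str.strip cell] := by
    simp [pvPart]
  unfold pvStep
  simp only [PySem.List.len_eq, Int.toNat_natCast]
  by_cases h : (i : Int) = (cols.length : Int)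
  · have hi' : i = cols.length := by omega
    rw [if_pos h]
    by_cases hc : PySem.Str.strip cell ≠ ""
    · rw [if_pos hc, getD_set]
      by_cases hk : k = i
      · subst hk
        rw [if_pos ⟨rfl, by simp; omega⟩, getD_pad, if_pos rfl, hpart,
          if_neg (by simpa using hc)]
      · rw [if_neg (fun h' => hk h'.1), getD_pad, if_neg hk, List.append_nil]
    · rw [if_neg hc, getD_pad, hpart, if_pos (not_not.mp hc)]
      split_ifs <;> simp
  · have hi' : i < cols.length := by omega
    rw [if_neg h]
    by_cases hc : PySem.Str.strip cell ≠ ""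
    · rw [if_pos hc, getD_set]
      by_cases hk : k = i
      · subst hk
        rw [if_pos ⟨rfl, hi'⟩, if_pos rfl, hpart, if_neg (by simpa using hc)]
      · rw [if_neg (fun h' => hk h'.1), if_neg hk, List.append_nil]
    · rw [if_neg hc, hpart, if_pos (not_not.mp hc)]
      split_ifs <;> simp

theorem inner_char (row : List String) : ∀ (i : Nat) (cols : List (List String)),
    i ≤ cols.length →
      ((PySem.List.enumerate row (i : Nat)).foldl pvStep cols).length
          = max cols.length (i + row.length)
      ∧ ∀ k, ((PySem.List.enumerate row (i : Nat)).foldl pvStep cols).getD k []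
          = cols.getD k [] ++ (if i ≤ k then pvPart row (k - i) else []) := by
  induction row with
  | nil =>
    intro i cols hi
    refine ⟨by simp [PySem.List.enumerate_nil]; omega, ?_⟩
    intro k
    simp [PySem.List.enumerate_nil, pvPart_nil]
  | cons cell rest ih =>
    intro i cols hi
    rw [PySem.List.enumerate_cons]
    have hcast : ((i : Int) + 1) = ((i + 1 : Nat) : Int) := by push_cast; ring
    rw [List.foldl_cons, hcast]
    have hi1 : i + 1 ≤ (pvStep cols ((i : Nat), cell)).length := by
      rw [step_len cols i cell hi]; omega
    obtain ⟨ihlen, ihget⟩ := ih (i + 1) (pvStep cols ((i : Nat), cell)) hi1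
    constructor
    · rw [ihlen, step_len cols i cell hi]
      simp only [List.length_cons]
      omega
    · intro k
      rw [ihget k, step_getD cols i cell hi k, List.append_assoc]
      congr 1
      by_cases hk1 : k < i
      · rw [if_neg (by omega), if_neg (by omega), if_neg (by omega)]
        rfl
      · by_cases hk2 : k = i
        · subst hk2
          rw [if_pos rfl, if_neg (by omega), if_pos (le_refl _)]
          have : k - k = 0 := by omega
          rw [this]
          simp [pvPart]
        · have hgt : i + 1 ≤ k := by omega
          rw [if_neg hk2, if_pos hgt, if_pos (by omega)]
          have : k - i = (k - (i + 1)) + 1 := by omega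
          rw [this]
          simp [pvPart]

theorem fold_len (rows : List (List String)) : ∀ cols : List (List String),
    (rows.foldl (fun cols row => (PySem.List.enumerate row 0).foldl pvStep cols) cols).length
      = max cols.length (pvM rows) := by
  induction rows with
  | nil => intro cols; simp [pvM]
  | cons r rs ih =>
    intro cols
    have key : ∀ (l : List Nat) (a : Nat), l.foldl max a = max a (l.foldl max 0) := by
      intro l
      induction l with
      | nil => simp
      | cons x xs ihx =>
        intro a
        simp only [List.foldl_cons]
        rw [ihx (max a x), ihx (max 0 x)]
        omega
    have hM : pvM (r :: rs) = max r.length (pvM rs) := by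
      unfold pvM
      simp only [List.map_cons, List.foldl_cons]
      rw [key _ (max 0 r.length)]
      omega
    simp only [List.foldl_cons, ih]
    have hin := (inner_char r 0 cols (by omega)).1
    rw [Nat.cast_zero] at hin
    rw [hin, hM]
    omega

theorem fold_getD (rows : List (List String)) : ∀ (cols : List (List String)) (k : Nat),
    (rows.foldl (fun cols row => (PySem.List.enumerate row 0).foldl pvStep cols) cols).getD k []
      = cols.getD k [] ++ pvCol k rows := by
  induction rows with
  | nil => intro cols k; simp [pvCol]
  | cons r rs ih =>
    intro cols k
    simp only [List.foldl_cons, ih]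
    have hin := (inner_char r 0 cols (by omega)).2 k
    rw [Nat.cast_zero] at hin
    rw [hin, pvCol_cons, if_pos (Nat.zero_le k), Nat.sub_zero, List.append_assoc]

theorem alt_eq_cols (rows : List (List String)) :
    build_composite_headers_alt rows
      = (List.range (pvM rows)).map (fun k => PySem.Str.join " " (pvCol k rows)) := by
  unfold build_composite_headers_alt
  have hlen : (rows.foldl (fun cols row => (PySem.List.enumerate row 0).foldl pvStep cols)
      []).length = pvM rows := by simp [fold_len]
  apply List.ext_getElem
  · simp [hlen]
  · intro k h1 h2
    simp only [List.getElem_map, List.getElem_range]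
    have hk : k < (rows.foldl (fun cols row => (PySem.List.enumerate row 0).foldl pvStep cols)
        []).length := by simp [hlen] at *; omega
    have : (rows.foldl (fun cols row => (PySem.List.enumerate row 0).foldl pvStep cols) [])[k]
        = (rows.foldl (fun cols row => (PySem.List.enumerate row 0).foldl pvStep cols)
            []).getD k [] := by
      rw [List.getD_eq_getElem?_getD, List.getElem?_eq_getElem hk, Option.getD_some]
    rw [this, fold_getD]
    simp

-- ----- A-side characterisation -----

-- the inner loop of A over the rows builds exactly pvCol k
theorem inner_eq_col (k : Nat) (rows : List (List String)) :
    ∀ acc : List String,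
      rows.foldl (fun col_parts row =>
          if (k : Int) < PySem.List.len row then
            let cell := PySem.Str.strip (PySem.List.pyGetD row (k : Int) "")
            if cell ≠ "" then col_parts ++ [cell] else col_parts
          else col_parts) acc
        = acc ++ pvCol k rows := by
  induction rows with
  | nil => intro acc; simp [pvCol]
  | cons r rs ih =>
    intro acc
    have hstep :
        (if (k : Int) < PySem.List.len r then
            let cell := PySem.Str.strip (PySem.List.pyGetD r (k : Int) "")
            if cell ≠ "" then acc ++ [cell] else acc
          else acc)
          = acc ++ pvPart r k := by
      unfold pvPart
      by_cases hk : k < r.length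
      · rw [if_pos (by rw [PySem.List.len_eq]; omega)]
        simp only [PySem.List.pyGetD_natCast]
        split_ifs with hc <;> simp_all
      · rw [if_neg (by rw [PySem.List.len_eq]; omega)]
        have hget : r.getD k "" = "" := by
          rw [List.getD_eq_getElem?_getD, List.getElem?_eq_none (by omega)]; rfl
        rw [hget, strip_empty]
        simp
    rw [List.foldl_cons, ih, pvCol_cons, ← List.append_assoc, ← hstep]

-- the Int running max A computes is pvM (cast)
theorem numcols_eq (r : List String) (rs : List (List String)) :
    ((PySem.List.max? ((r :: rs).map (fun row => PySem.List.len row)) (fun x => x)).getD 0)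
      = ((pvM (r :: rs) : Nat) : Int) := by
  have cast_fold : ∀ (l : List (List String)) (a : Nat),
      (l.map (fun row => PySem.List.len row)).foldl max ((a : Nat) : Int)
        = (((l.map List.length).foldl max a : Nat) : Int) := by
    intro l
    induction l with
    | nil => intro a; simp
    | cons x xs ih =>
      intro a
      simp only [List.map_cons, List.foldl_cons, PySem.List.len_eq]
      rw [show max ((a : Nat) : Int) ((x.length : Nat) : Int) = ((max a x.length : Nat) : Int) by
        push_cast; rfl]
      exact ih (max a x.length)
  simp only [List.map_cons, PySem.List.max?_id_cons, Option.getD_some]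
  have : pvM (r :: rs) = (rs.map List.length).foldl max r.length := by
    unfold pvM; simp
  rw [this, PySem.List.len_eq, ← cast_fold rs r.length]

theorem build_composite_headers_eq (rows : List (List String)) :
    build_composite_headers rows = build_composite_headers_alt rows := by
  cases rows with
  | nil =>
    rw [build_composite_headers, alt_eq_cols]
    simp [pvM]
  | cons r rs =>
    rw [build_composite_headers, alt_eq_cols]
    simp only [numcols_eq r rs, reduceCtorEq, reduceIte]
    rw [PySem.List.pyRange_one, List.foldl_map]
    have hN : (((pvM (r :: rs) : Nat) : Int) - 0).toNat = pvM (r :: rs) := by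
      simp
    rw [hN]
    have outer : ∀ (n : Nat) (init : List String),
        (List.range n).foldl (fun (composite : List String) (k : Nat) =>
            composite ++ [PySem.Str.join " "
              ((r :: rs).foldl (fun col_parts row =>
                  if (0 : Int) + (k : Int) < PySem.List.len row then
                    let cell := PySem.Str.strip (PySem.List.pyGetD row ((0 : Int) + (k : Int)) "")
                    if cell ≠ "" then col_parts ++ [cell] else col_parts
                  else col_parts) ([] : List String))]) init
          = init ++ (List.range n).map (fun k => PySem.Str.join " " (pvCol k (r :: rs))) := by
      intro n
      induction n with
      | zero => intro init; simp
      | succ m ihm =>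
        intro init
        rw [List.range_succ, List.foldl_append, List.map_append, ihm]
        rw [List.foldl_cons, List.foldl_nil]
        rw [show ((0 : Int) + (m : Int)) = ((m : Nat) : Int) by omega]
        rw [inner_eq_col m (r :: rs) []]
        simp [List.append_assoc]
    exact outer (pvM (r :: rs)) []

-- ===== VERDICT (by name: the statement is the Claim_ definition above) =====
theorem build_composite_headers_spec : Claim_equal_build_composite_headers := by
  intro rows _
  unfold Spec_build_composite_headers
  exact build_composite_headers_eq rows
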